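-- pv_equiv track=rewrite | github.com/Rickory2021/competitive-programming | hackpack/math/minkowski_sum.py | minkowski_sum_1d_bitset
-- ===== SOURCE A (Python) =====
-- def minkowski_sum_1d_bitset(Sets):
--     """
--     Example:
--             A = {0, 3, 6}   (2 items worth 3 units)
--             B = {0, 5, 10}  (2 items worth 5 units)
--             C = {0, 2, 4}   (2 items worth 2 units)
--
--             Max possible total = 6 + 10 + 4 = 20
--
--             A + B + C= { a + b + C | a ∈ A, b ∈ B, c ∈ C}
--             X = A + B = { (A << b_0) | (A << b_1) | (A << b_2) | ... for b_i in B }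
--
--             A + B + C = X + C = { (X << c_0) | (X << c_1) | (X << c_2) | ... for c_i in C }
--     """
--     # Initializebitset
--     """
--     (0b1) because we can make the sum 0 by picking nothing from all Sets.
--     Written out with positions labeled:
--         bit position:  ... 3  2  1  0
--         bit value:     ... 0  0  0  1
--     """
--     reachable = 1
--
--     # For Each Set,
--     for Set in Sets:
--         # Makes a new to previous results does not muddy the current result
--         new_reachable = 0
--         for val in Set:
--             """
--             << mean to add val to every element in the new reachable sums
--             |= means union with what we already found
--             Together it means that we can make new sums by adding val to every sum we could already make,
--                 and we combine that with the sums we could already make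
--             """
--             new_reachable |= reachable << val
--
--         # Update reachable sums with the new reachable sums after processing the current group
--         reachable = new_reachable
--
--     return reachable
-- ===== SOURCE B (Python) =====
-- def minkowski_sum_1d_bitset(Sets):
--     # Explicit set of reachable totals instead of a bit-parallel shift-OR bitset.
--     reachable = {0}
--     for group in Sets:
--         reachable = {r + v for r in reachable for v in group}
--     out = 0
--     for s in reachable:
--         out |= 1 << s
--     return out
-- ===== Notes on version B (the rewrite author's own statement) =====
-- stated objective: alternative
-- what changed: B keeps the reachable totals as an explicit set of integers and enumerates pairwise sums per group, converting to the integer bitset only at the end, instead of A's bit-parallel shift-OR on one big integer.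
import Mathlib
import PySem

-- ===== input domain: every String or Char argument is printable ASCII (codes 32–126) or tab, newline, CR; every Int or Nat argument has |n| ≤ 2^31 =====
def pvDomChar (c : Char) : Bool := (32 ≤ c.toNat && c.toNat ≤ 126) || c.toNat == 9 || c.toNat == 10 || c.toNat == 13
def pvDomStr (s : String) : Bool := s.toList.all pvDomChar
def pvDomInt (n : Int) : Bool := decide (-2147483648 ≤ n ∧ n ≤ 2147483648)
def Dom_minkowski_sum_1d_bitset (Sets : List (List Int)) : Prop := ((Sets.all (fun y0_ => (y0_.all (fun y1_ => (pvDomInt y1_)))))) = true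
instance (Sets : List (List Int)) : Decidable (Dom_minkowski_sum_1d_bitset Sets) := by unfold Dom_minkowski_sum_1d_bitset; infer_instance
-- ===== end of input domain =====

-- B keeps the reachable totals as an explicit set of integers (pairwise sums per group),
-- converting to the bitset integer only at the end, instead of A's bit-parallel shift-OR; alternative, not faster.

-- Python '<<' and '|' on ints, exact for nonnegative operands (guaranteed by Pre_).
def pyShlNN (a v : Int) : Int := Int.ofNat (a.toNat <<< v.toNat)
def pyOrNN (a b : Int) : Int := Int.ofNat (a.toNat ||| b.toNat)

-- ===== PORT A =====
def minkowski_sum_1d_bitset (Sets : List (List Int)) : Int :=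
  Sets.foldl (fun reachable g =>
    g.foldl (fun nr v => pyOrNN nr (pyShlNN reachable v)) 0) 1

-- ===== PORT B =====
def minkowski_sum_1d_bitset_alt (Sets : List (List Int)) : Int :=
  let final : PySem.Set Int := Sets.foldl (fun reachable g =>
    reachable.foldl (fun acc r => g.foldl (fun acc v => PySem.Set.add acc (r + v)) acc)
      PySem.Set.empty) (PySem.Set.ofList [0])
  final.foldl (fun out s => pyOrNN out (pyShlNN 1 s)) 0

-- ===== PRECONDITION & SPEC =====
-- Pre_ excludes exactly the inputs where Python A raises ValueError (a negative shift count):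
-- any negative value in any group.
def Pre_minkowski_sum_1d_bitset (Sets : List (List Int)) : Prop :=
  ∀ g ∈ Sets, ∀ v ∈ g, 0 ≤ v
instance (Sets : List (List Int)) : Decidable (Pre_minkowski_sum_1d_bitset Sets) := by
  unfold Pre_minkowski_sum_1d_bitset; infer_instance

def pvWitness_minkowski_sum_1d_bitset : List (List Int) := [[0, 3, 6], [0, 5, 10], [0, 2, 4]]

def Spec_minkowski_sum_1d_bitset (Sets : List (List Int)) (out : Int) : Prop := out = minkowski_sum_1d_bitset_alt Sets
instance (Sets : List (List Int)) (out : Int) : Decidable (Spec_minkowski_sum_1d_bitset Sets out) := by unfold Spec_minkowski_sum_1d_bitset; infer_instance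

-- ===== CLAIM (what is proved, stated in full; the proofs are below) =====
def Claim_equal_minkowski_sum_1d_bitset : Prop := ∀ (Sets : List (List Int)), Dom_minkowski_sum_1d_bitset Sets → Pre_minkowski_sum_1d_bitset Sets → Spec_minkowski_sum_1d_bitset Sets (minkowski_sum_1d_bitset Sets)

-- ===== LEMMAS AND PROOFS =====

theorem pyOrNN_nonneg (a b : Int) : 0 ≤ pyOrNN a b := by simp [pyOrNN]

theorem toNat_pyOrNN (a b : Int) : (pyOrNN a b).toNat = a.toNat ||| b.toNat := rfl

theorem toNat_pyShlNN (a v : Int) : (pyShlNN a v).toNat = a.toNat <<< v.toNat := rfl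

theorem foldl_pyOrNN_nonneg (f : Int → Int) (l : List Int) (b : Int) (hb : 0 ≤ b) :
    0 ≤ l.foldl (fun nr v => pyOrNN nr (f v)) b := by
  induction l generalizing b with
  | nil => exact hb
  | cons v l ih => exact ih _ (pyOrNN_nonneg _ _)

-- membership in B's inner fold over one r
theorem mem_inner_fold (g : List Int) (r : Int) (acc : PySem.Set Int) (x : Int) :
    x ∈ g.foldl (fun acc v => PySem.Set.add acc (r + v)) acc ↔
      x ∈ acc ∨ ∃ v ∈ g, r + v = x := by
  induction g generalizing acc with
  | nil => simp
  | cons v g ih =>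
    rw [List.foldl_cons, ih, PySem.Set.mem_add]
    constructor
    · rintro ((h | h) | ⟨v', hv', h⟩)
      · exact Or.inl h
      · exact Or.inr ⟨v, List.mem_cons_self .., h.symm⟩
      · exact Or.inr ⟨v', List.mem_cons_of_mem _ hv', h⟩
    · rintro (h | ⟨v', hv', h⟩)
      · exact Or.inl (Or.inl h)
      · rcases List.mem_cons.mp hv' with hv' | hv'
        · subst hv'; exact Or.inl (Or.inr h.symm)
        · exact Or.inr ⟨v', hv', h⟩

-- membership in B's per-group double fold
theorem mem_group_fold (S : List Int) (g : List Int) (acc : PySem.Set Int) (x : Int) :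
    x ∈ S.foldl (fun acc r => g.foldl (fun acc v => PySem.Set.add acc (r + v)) acc) acc ↔
      x ∈ acc ∨ ∃ r ∈ S, ∃ v ∈ g, r + v = x := by
  induction S generalizing acc with
  | nil => simp
  | cons r S ih =>
    rw [List.foldl_cons, ih, mem_inner_fold]
    constructor
    · rintro ((h | ⟨v, hv, h⟩) | ⟨r', hr', v, hv, h⟩)
      · exact Or.inl h
      · exact Or.inr ⟨r, List.mem_cons_self .., v, hv, h⟩
      · exact Or.inr ⟨r', List.mem_cons_of_mem _ hr', v, hv, h⟩
    · rintro (h | ⟨r', hr', v, hv, h⟩)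
      · exact Or.inl (Or.inl h)
      · rcases List.mem_cons.mp hr' with hr' | hr'
        · subst hr'; exact Or.inl (Or.inr ⟨v, hv, h⟩)
        · exact Or.inr ⟨r', hr', v, hv, h⟩

-- bit characterisation of A's inner fold over one group
theorem testBit_a_inner (g : List Int) (a : Int) (S : List Int)
    (hg : ∀ v ∈ g, 0 ≤ v) (hS : ∀ s ∈ S, 0 ≤ s)
    (hbits : ∀ i : Nat, a.toNat.testBit i = true ↔ (i : Int) ∈ S)
    (nr : Int) (T : Int → Prop)
    (hnr : ∀ i : Nat, nr.toNat.testBit i = true ↔ T i) :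
    ∀ i : Nat, (g.foldl (fun nr v => pyOrNN nr (pyShlNN a v)) nr).toNat.testBit i = true ↔
      T i ∨ ∃ v ∈ g, ∃ r ∈ S, r + v = (i : Int) := by
  induction g generalizing nr T with
  | nil => simp [hnr]
  | cons v g ih =>
    intro i
    have hv0 : 0 ≤ v := hg v (List.mem_cons_self ..)
    have hg' : ∀ w ∈ g, 0 ≤ w := fun w hw => hg w (List.mem_cons_of_mem _ hw)
    have hstep : ∀ j : Nat, (pyOrNN nr (pyShlNN a v)).toNat.testBit j = true ↔
        (fun x : Int => T x ∨ ∃ r ∈ S, r + v = x) (j : Int) := by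
      intro j
      rw [toNat_pyOrNN, toNat_pyShlNN, Nat.testBit_lor, Nat.testBit_shiftLeft]
      simp only [Bool.or_eq_true, Bool.and_eq_true, decide_eq_true_eq, hnr]
      constructor
      · rintro (h | ⟨hle, hbit⟩)
        · exact Or.inl h
        · refine Or.inr ⟨((j - v.toNat : Nat) : Int), (hbits _).mp hbit, ?_⟩
          omega
      · rintro (h | ⟨r, hr, hrv⟩)
        · exact Or.inl h
        · have hr0 : 0 ≤ r := hS r hr
          have hle : v.toNat ≤ j := by omega
          refine Or.inr ⟨hle, (hbits _).mpr ?_⟩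
          have heq : ((j - v.toNat : Nat) : Int) = r := by omega
          rw [heq]; exact hr
    rw [List.foldl_cons]
    rw [ih hg' (pyOrNN nr (pyShlNN a v)) (fun x : Int => T x ∨ ∃ r ∈ S, r + v = x) hstep i]
    constructor
    · rintro ((h | ⟨r, hr, hrv⟩) | ⟨w, hw, r, hr, hrw⟩)
      · exact Or.inl h
      · exact Or.inr ⟨v, List.mem_cons_self .., r, hr, hrv⟩
      · exact Or.inr ⟨w, List.mem_cons_of_mem _ hw, r, hr, hrw⟩
    · rintro (h | ⟨w, hw, r, hr, hrw⟩)
      · exact Or.inl (Or.inl h)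
      · rcases List.mem_cons.mp hw with hw | hw
        · subst hw; exact Or.inl (Or.inr ⟨r, hr, hrw⟩)
        · exact Or.inr ⟨w, hw, r, hr, hrw⟩

-- bit characterisation of B's final bitset-building fold
theorem testBit_out_fold (S : List Int) (hS : ∀ s ∈ S, 0 ≤ s) (out : Int) :
    ∀ i : Nat, (S.foldl (fun out s => pyOrNN out (pyShlNN 1 s)) out).toNat.testBit i = true ↔
      out.toNat.testBit i = true ∨ (i : Int) ∈ S := by
  induction S generalizing out with
  | nil => simp
  | cons s S ih =>
    intro i
    have hs0 : 0 ≤ s := hS s (List.mem_cons_self ..)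
    have hS' : ∀ t ∈ S, 0 ≤ t := fun t ht => hS t (List.mem_cons_of_mem _ ht)
    rw [List.foldl_cons, ih hS' _ i]
    have hstep : (pyOrNN out (pyShlNN 1 s)).toNat.testBit i = true ↔
        out.toNat.testBit i = true ∨ (i : Int) = s := by
      rw [toNat_pyOrNN, toNat_pyShlNN, Nat.testBit_lor, Nat.testBit_shiftLeft]
      have h1 : (1 : Int).toNat = 1 := rfl
      rw [h1]
      simp only [Bool.or_eq_true, Bool.and_eq_true, decide_eq_true_eq,
        Nat.testBit_one_eq_true_iff_self_eq_zero]
      constructor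
      · rintro (h | ⟨hle, hz⟩)
        · exact Or.inl h
        · exact Or.inr (by omega)
      · rintro (h | h)
        · exact Or.inl h
        · exact Or.inr ⟨by omega, by omega⟩
    rw [hstep]
    simp only [List.mem_cons]
    tauto

theorem minkowski_core (Sets : List (List Int)) (hpre : ∀ g ∈ Sets, ∀ v ∈ g, 0 ≤ v)
    (a : Int) (S : PySem.Set Int)
    (ha : 0 ≤ a) (hS : ∀ s ∈ S, 0 ≤ s)
    (hbits : ∀ i : Nat, a.toNat.testBit i = true ↔ (i : Int) ∈ S) :
    0 ≤ (Sets.foldl (fun reachable g =>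
        g.foldl (fun nr v => pyOrNN nr (pyShlNN reachable v)) 0) a) ∧
    (∀ s ∈ (Sets.foldl (fun reachable g =>
        reachable.foldl (fun acc r => g.foldl (fun acc v => PySem.Set.add acc (r + v)) acc)
          PySem.Set.empty) S), 0 ≤ s) ∧
    ∀ i : Nat, (Sets.foldl (fun reachable g =>
        g.foldl (fun nr v => pyOrNN nr (pyShlNN reachable v)) 0) a).toNat.testBit i = true ↔
      (i : Int) ∈ (Sets.foldl (fun reachable g =>
        reachable.foldl (fun acc r => g.foldl (fun acc v => PySem.Set.add acc (r + v)) acc)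
          PySem.Set.empty) S) := by
  induction Sets generalizing a S with
  | nil => exact ⟨ha, hS, hbits⟩
  | cons g Sets ih =>
    have hg : ∀ v ∈ g, 0 ≤ v := hpre g (List.mem_cons_self ..)
    have hpre' : ∀ h ∈ Sets, ∀ v ∈ h, 0 ≤ v := fun h hh => hpre h (List.mem_cons_of_mem _ hh)
    rw [List.foldl_cons, List.foldl_cons]
    set a1 := g.foldl (fun nr v => pyOrNN nr (pyShlNN a v)) 0 with ha1
    set S1 := S.foldl (fun acc r => g.foldl (fun acc v => PySem.Set.add acc (r + v)) acc)
        PySem.Set.empty with hS1def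
    have ha1p : 0 ≤ a1 := foldl_pyOrNN_nonneg _ g 0 le_rfl
    have hS1mem : ∀ x, x ∈ S1 ↔ ∃ r ∈ S, ∃ v ∈ g, r + v = x := by
      intro x; rw [hS1def, mem_group_fold]
      simp [PySem.Set.empty]
    have hS1p : ∀ s ∈ S1, 0 ≤ s := by
      intro s hs
      rcases (hS1mem s).mp hs with ⟨r, hr, v, hv, hrv⟩
      have := hS r hr; have := hg v hv; omega
    have hbits1 : ∀ i : Nat, a1.toNat.testBit i = true ↔ (i : Int) ∈ S1 := by
      intro i
      rw [ha1, testBit_a_inner g a S hg hS hbits 0 (fun _ => False) (by simp) i, hS1mem]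
      constructor
      · rintro (h | ⟨v, hv, r, hr, hrv⟩)
        · exact absurd h id
        · exact ⟨r, hr, v, hv, hrv⟩
      · rintro ⟨r, hr, v, hv, hrv⟩
        exact Or.inr ⟨v, hv, r, hr, hrv⟩
    exact ih hpre' a1 S1 ha1p hS1p hbits1

-- ===== VERDICT (by name: the statement is the Claim_ definition above) =====
theorem minkowski_sum_1d_bitset_spec : Claim_equal_minkowski_sum_1d_bitset := by
  intro Sets _ hpre
  unfold Spec_minkowski_sum_1d_bitset minkowski_sum_1d_bitset minkowski_sum_1d_bitset_alt
  have hinit : ∀ i : Nat, (1 : Int).toNat.testBit i = true ↔ (i : Int) ∈ PySem.Set.ofList ([0] : List Int) := by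
    intro i
    have h1 : (1 : Int).toNat = 1 := rfl
    rw [h1, Nat.testBit_one_eq_true_iff_self_eq_zero, PySem.Set.mem_ofList]
    simp
  obtain ⟨ha', hS', hbits'⟩ := minkowski_core Sets hpre 1 (PySem.Set.ofList [0]) (by norm_num)
    (by intro s hs; rw [PySem.Set.mem_ofList] at hs; simp at hs; omega) hinit
  set a' := Sets.foldl (fun reachable g =>
      g.foldl (fun nr v => pyOrNN nr (pyShlNN reachable v)) 0) (1 : Int) with ha'def
  set S' := Sets.foldl (fun reachable g =>
      reachable.foldl (fun acc r => g.foldl (fun acc v => PySem.Set.add acc (r + v)) acc)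
        PySem.Set.empty) (PySem.Set.ofList [(0 : Int)]) with hS'def
  show a' = S'.foldl (fun out s => pyOrNN out (pyShlNN 1 s)) 0
  set out := S'.foldl (fun out s => pyOrNN out (pyShlNN 1 s)) (0 : Int) with hout
  have hbout : ∀ i : Nat, out.toNat.testBit i = true ↔ (i : Int) ∈ S' := by
    intro i
    rw [hout, testBit_out_fold S' hS' 0 i]
    simp
  have houtp : 0 ≤ out := foldl_pyOrNN_nonneg _ S' 0 le_rfl
  have htn : a'.toNat = out.toNat := by
    apply Nat.eq_of_testBit_eq
    intro i
    have h := (hbits' i).trans (hbout i).symm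
    revert h
    cases a'.toNat.testBit i <;> cases out.toNat.testBit i <;> simp
  have hcast := congrArg (fun n : Nat => (n : Int)) htn
  simpa [Int.toNat_of_nonneg ha', Int.toNat_of_nonneg houtp] using hcast
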